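-- pv_equiv track=rewrite | github.com/Makufff/PSCP-y1 | Mock Final/Socks.py | find_pair_socks
-- ===== SOURCE A (Python) =====
-- from collections import Counter
--
-- def find_pair_socks(socks):
--     """find Pair Socks"""
--     sock_count = Counter(socks)
--     paired_socks = []
--     for sock, count in sorted(sock_count.items()):
--         pairs = count // 2
--         if pairs > 0:
--             paired_socks.extend([sock + sock] * pairs)
--     result = " ".join(paired_socks) if paired_socks else "None"
--     total_pairs = len(paired_socks)
--     return result, total_pairs
-- ===== SOURCE B (Python) =====
-- def find_pair_socks(socks):
--     """find Pair Socks: one greedy parity-toggle pass (pending set), no counting."""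
--     pending = set()
--     pairs = []
--     for s in socks:
--         if s in pending:
--             pending.discard(s)
--             pairs.append(s)
--         else:
--             pending.add(s)
--     pairs.sort()
--     if pairs:
--         return " ".join(p + p for p in pairs), len(pairs)
--     return "None", 0
-- ===== Notes on version B (the rewrite author's own statement) =====
-- stated objective: alternative
-- what changed: B replaces A's count-then-divide algorithm (Counter, sorted items, count//2 copies each) by a greedy parity-toggle pass: a pending set of unmatched socks where each incoming sock either completes a pair immediately or becomes pending, followed by one sort of the emitted pair names; no counts or // are ever computed.
import Mathlib
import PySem

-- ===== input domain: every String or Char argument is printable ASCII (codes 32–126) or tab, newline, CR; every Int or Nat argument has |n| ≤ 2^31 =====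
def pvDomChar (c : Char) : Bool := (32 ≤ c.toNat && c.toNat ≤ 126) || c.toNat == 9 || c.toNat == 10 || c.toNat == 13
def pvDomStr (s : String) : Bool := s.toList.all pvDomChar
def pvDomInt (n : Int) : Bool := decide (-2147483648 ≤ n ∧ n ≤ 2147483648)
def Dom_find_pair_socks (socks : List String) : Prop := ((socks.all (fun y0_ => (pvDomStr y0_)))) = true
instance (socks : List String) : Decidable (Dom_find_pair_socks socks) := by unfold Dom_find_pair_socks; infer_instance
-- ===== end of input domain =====

-- B replaces A's Counter/count//2 algorithm by a greedy parity-toggle pass over the raw list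
-- (a pending set of unmatched socks) followed by one sort of the emitted pair names (alternative, no speed claim).

-- ===== PORT A =====
def find_pair_socks (socks : List String) : String × Int :=
  let sock_count := PySem.Dict.counter socks
  let paired_socks : List String :=
    (PySem.List.sorted2 sock_count.items (fun p => p.1) (fun p => p.2)).foldl
      (fun acc p =>
        let pairs := PySem.Int.floordiv p.2 2
        if pairs > 0 then acc ++ PySem.List.pyRepeat [p.1 ++ p.1] pairs else acc) []
  let result := if paired_socks.isEmpty then "None" else PySem.Str.join " " paired_socks
  let total_pairs : Int := (paired_socks.length : Int)
  (result, total_pairs)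

-- ===== PORT B =====
-- Source B's loop body: 's in pending' either completes a pair (discard + append) or adds s to pending
def pvStep (st : PySem.Set String × List String) (s : String) : PySem.Set String × List String :=
  if PySem.Set.contains st.1 s then (PySem.Set.discard st.1 s, st.2 ++ [s])
  else (PySem.Set.add st.1 s, st.2)

def find_pair_socks_alt (socks : List String) : String × Int :=
  let st := socks.foldl pvStep (PySem.Set.empty, [])
  let pairs := PySem.List.sorted st.2 (fun x => x)
  if pairs.isEmpty then ("None", 0)
  else (PySem.Str.join " " (pairs.map (fun p => p ++ p)), (pairs.length : Int))

-- ===== PRECONDITION & SPEC =====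
def Spec_find_pair_socks (socks : List String) (out : String × Int) : Prop := out = find_pair_socks_alt socks
instance (socks : List String) (out : String × Int) : Decidable (Spec_find_pair_socks socks out) := by unfold Spec_find_pair_socks; infer_instance

-- ===== CLAIM =====
def Claim_equal_find_pair_socks : Prop := ∀ (socks : List String), Dom_find_pair_socks socks → Spec_find_pair_socks socks (find_pair_socks socks)

-- ===== LEMMAS AND PROOFS =====

-- insertBy only looks at comparisons of the inserted element with accumulator elements
lemma pvInsertBy_congr {α : Type} (p q : α → α → Bool) (x : α) (ys : List α)
    (h : ∀ b ∈ ys, p x b = q x b) :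
    PySem.List.insertBy p x ys = PySem.List.insertBy q x ys := by
  induction ys with
  | nil => rfl
  | cons y ys ih =>
      simp only [PySem.List.insertBy]
      rw [h y (by simp)]
      split
      · rfl
      · rw [ih (fun b hb => h b (by simp [hb]))]

-- an insertion-sort fold is unchanged when the two comparators agree on all pairs from a carrier
lemma pvFoldlInsertBy_congr {α : Type} (p q : α → α → Bool) (L : List α)
    (hpq : ∀ a ∈ L, ∀ b ∈ L, p a b = q a b) :
    ∀ (xs acc : List α), (∀ x ∈ xs, x ∈ L) → (∀ x ∈ acc, x ∈ L) →
      xs.foldl (fun acc x => PySem.List.insertBy p x acc) acc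
        = xs.foldl (fun acc x => PySem.List.insertBy q x acc) acc := by
  intro xs
  induction xs with
  | nil => intro acc _ _; rfl
  | cons x xs ih =>
      intro acc hxs hacc
      simp only [List.foldl_cons]
      rw [pvInsertBy_congr p q x acc (fun b hb => hpq x (hxs x (by simp)) b (hacc b hb))]
      refine ih _ (fun y hy => hxs y (by simp [hy])) ?_
      intro y hy
      rcases (PySem.List.mem_insertBy _ _ _ _).1 hy with h | h
      · exact h ▸ hxs x (by simp)
      · exact hacc y h

-- on a list whose first components are "injective", Python's tuple sort is the sort by first key
lemma pvSorted2_fst (xs : List (String × Int))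
    (hinj : ∀ a ∈ xs, ∀ b ∈ xs, a.1 = b.1 → a = b) :
    PySem.List.sorted2 xs (fun p => p.1) (fun p => p.2)
      = PySem.List.sorted xs (fun p => p.1) := by
  simp only [PySem.List.sorted2, PySem.List.sorted, if_neg (by decide : ¬ (false = true))]
  refine pvFoldlInsertBy_congr _ _ xs ?_ xs [] (fun _ h => h) (by simp)
  intro a ha b hb
  by_cases hab : a.1 = b.1
  · have : a = b := hinj a ha b hb hab
    subst this
    simp
  · rcases lt_or_gt_of_ne hab with h | h
    · simp [h, asymm h]
    · simp [h, asymm h]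

-- A's loop body appends pairs ⋅ [sock+sock] unconditionally (the guard only skips empty appends)
lemma pvAFold (l : List (String × Int)) :
    l.foldl
      (fun acc p =>
        let pairs := PySem.Int.floordiv p.2 2
        if pairs > 0 then acc ++ PySem.List.pyRepeat [p.1 ++ p.1] pairs else acc) []
      = l.flatMap (fun p => List.replicate (PySem.Int.floordiv p.2 2).toNat (p.1 ++ p.1)) := by
  rw [PySem.List.foldl_congr_mem
      (g := fun acc p => acc ++ List.replicate (PySem.Int.floordiv p.2 2).toNat (p.1 ++ p.1))]
  · exact PySem.List.foldl_append_eq_flatMap _ _ _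
  · intro acc p _
    simp only [PySem.List.pyRepeat_singleton]
    split_ifs with h
    · rfl
    · have h0 : (PySem.Int.floordiv p.2 2).toNat = 0 :=
        Int.toNat_of_nonpos (not_lt.1 h)
      rw [h0]
      simp

-- the toggle pass: per key, the emitted pairs count processed//2 and pending holds the parity bit
lemma pvToggle_spec :
    ∀ (l : List String) (pend : PySem.Set String) (pairs : List String) (k : String),
      ((l.foldl pvStep (pend, pairs)).2).count k
          = pairs.count k + (l.count k + (if k ∈ pend then 1 else 0)) / 2
      ∧ ((if k ∈ (l.foldl pvStep (pend, pairs)).1 then 1 else 0)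
          = (l.count k + (if k ∈ pend then 1 else 0)) % 2) := by
  intro l
  induction l with
  | nil =>
      intro pend pairs k
      refine ⟨?_, ?_⟩
      · simp only [List.foldl_nil, List.count_nil]
        split_ifs <;> simp
      · simp only [List.foldl_nil, List.count_nil]
        split_ifs <;> simp
  | cons s l ih =>
      intro pend pairs k
      simp only [List.foldl_cons, pvStep]
      by_cases hs : s ∈ pend
      · rw [if_pos ((PySem.Set.contains_iff _ _).2 hs)]
        obtain ⟨ih1, ih2⟩ := ih (PySem.Set.discard pend s) (pairs ++ [s]) k
        by_cases hk : k = s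
        · subst hk
          have hnd : k ∉ PySem.Set.discard pend k :=
            fun h => ((PySem.Set.mem_discard _ _ _).1 h).2 rfl
          rw [if_neg hnd] at ih1 ih2
          rw [List.count_cons_self, if_pos hs]
          refine ⟨?_, ?_⟩
          · rw [ih1, List.count_append]
            have h1 : List.count k [k] = 1 := by simp
            rw [h1]
            omega
          · rw [ih2]
            omega
        · have hmem : k ∈ PySem.Set.discard pend s ↔ k ∈ pend := by
            rw [PySem.Set.mem_discard]
            exact ⟨fun h => h.1, fun h => ⟨h, hk⟩⟩
          have hc : List.count k (pairs ++ [s]) = List.count k pairs := by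
            rw [List.count_append, List.count_eq_zero.2 (by simp [hk] : k ∉ [s])]
            omega
          rw [hc] at ih1
          rw [List.count_cons_of_ne (Ne.symm hk)]
          by_cases hp : k ∈ pend
          · rw [if_pos (hmem.2 hp)] at ih1 ih2
            rw [if_pos hp]
            exact ⟨ih1, ih2⟩
          · rw [if_neg (fun h => hp (hmem.1 h))] at ih1 ih2
            rw [if_neg hp]
            exact ⟨ih1, ih2⟩
      · rw [if_neg (fun h => hs ((PySem.Set.contains_iff _ _).1 h))]
        obtain ⟨ih1, ih2⟩ := ih (PySem.Set.add pend s) pairs k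
        by_cases hk : k = s
        · subst hk
          have hmem : k ∈ PySem.Set.add pend k := (PySem.Set.mem_add _ _ _).2 (Or.inr rfl)
          rw [if_pos hmem] at ih1 ih2
          rw [List.count_cons_self, if_neg hs]
          refine ⟨?_, ?_⟩
          · rw [ih1]
          · rw [ih2]
        · have hmem : k ∈ PySem.Set.add pend s ↔ k ∈ pend := by
            rw [PySem.Set.mem_add]
            exact ⟨fun h => h.resolve_right hk, Or.inl⟩
          rw [List.count_cons_of_ne (Ne.symm hk)]
          by_cases hp : k ∈ pend
          · rw [if_pos (hmem.2 hp)] at ih1 ih2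
            rw [if_pos hp]
            exact ⟨ih1, ih2⟩
          · rw [if_neg (fun h => hp (hmem.1 h))] at ih1 ih2
            rw [if_neg hp]
            exact ⟨ih1, ih2⟩

-- count of k in a flatMap of replicates over nodup keys
lemma pvCount_flatMap_replicate (f : String → Nat) (k : String) :
    ∀ (keys : List String), keys.Nodup →
      (keys.flatMap (fun x => List.replicate (f x) x)).count k
        = if k ∈ keys then f k else 0 := by
  intro keys
  induction keys with
  | nil => intro _; simp
  | cons x keys ih =>
      intro hnd
      rw [List.flatMap_cons, List.count_append, ih (List.nodup_cons.1 hnd).2]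
      by_cases hk : k = x
      · subst hk
        simp [(List.nodup_cons.1 hnd).1]
      · rw [List.count_eq_zero.2 (fun h => hk (List.eq_of_mem_replicate h))]
        simp [hk]

-- a flatMap of replicates over a strictly increasing key list is pairwise ≤
lemma pvFlatMap_replicate_pairwise (f : String → Nat) :
    ∀ (keys : List String), keys.Pairwise (· < ·) →
      (keys.flatMap (fun x => List.replicate (f x) x)).Pairwise (· ≤ ·) := by
  intro keys
  induction keys with
  | nil => intro _; simp
  | cons x keys ih =>
      intro hpw
      obtain ⟨hx, htl⟩ := List.pairwise_cons.1 hpw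
      rw [List.flatMap_cons, List.pairwise_append]
      refine ⟨List.pairwise_replicate.2 (Or.inr le_rfl), ih htl, ?_⟩
      intro a ha b hb
      have ha' : a = x := List.eq_of_mem_replicate ha
      obtain ⟨kb, hkb, hbr⟩ := List.mem_flatMap.1 hb
      have hb' : b = kb := List.eq_of_mem_replicate hbr
      rw [ha', hb']
      exact le_of_lt (hx kb hkb)

-- ===== VERDICT =====
theorem find_pair_socks_spec : Claim_equal_find_pair_socks := by
  intro socks _
  unfold Spec_find_pair_socks find_pair_socks find_pair_socks_alt
  -- the sorted distinct keys, shared by both sides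
  set keys := PySem.List.sorted (PySem.Set.ofList socks) (fun x => x) with hkeys
  have hkeysnd : keys.Nodup :=
    (PySem.List.sorted_perm _ (fun x => x) false).nodup_iff.2 (PySem.Set.nodup_ofList _)
  have hkeyslt : keys.Pairwise (· < ·) := by
    have hle := PySem.List.sorted_pairwise (PySem.Set.ofList socks) (fun x => x)
    exact (hle.and hkeysnd).imp (fun h => lt_of_le_of_ne h.1 h.2)
  have hkeysmem : ∀ k, k ∈ keys ↔ k ∈ socks := by
    intro k
    rw [hkeys, (PySem.List.sorted_perm _ (fun x => x) false).mem_iff, PySem.Set.mem_ofList]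
  -- A's list of doubled socks in key order
  have hpaired :
      (PySem.List.sorted2 (PySem.Dict.counter socks).items (fun p => p.1) (fun p => p.2)).foldl
        (fun acc p =>
          let pairs := PySem.Int.floordiv p.2 2
          if pairs > 0 then acc ++ PySem.List.pyRepeat [p.1 ++ p.1] pairs else acc) []
      = (keys.flatMap (fun k => List.replicate (socks.count k / 2) k)).map
          (fun p => p ++ p) := by
    have hitems : (PySem.Dict.counter socks).items
        = (PySem.Set.ofList socks).map (fun k => (k, (socks.count k : Int))) :=
      PySem.Dict.items_counter socks
    have hinj : ∀ a ∈ (PySem.Dict.counter socks).items,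
        ∀ b ∈ (PySem.Dict.counter socks).items, a.1 = b.1 → a = b := by
      rw [hitems]
      intro a ha b hb hab
      obtain ⟨ka, _, hka⟩ := List.mem_map.1 ha
      obtain ⟨kb, _, hkb⟩ := List.mem_map.1 hb
      rw [← hka, ← hkb]
      rw [← hka, ← hkb] at hab
      simp only at hab
      rw [hab]
    have hsorted : PySem.List.sorted (PySem.Dict.counter socks).items (fun p => p.1)
        = keys.map (fun k => (k, (socks.count k : Int))) := by
      apply PySem.List.sorted_eq_of_perm_of_pairwise_lt
      · rw [hitems]
        exact (PySem.List.sorted_perm _ (fun x => x) false).map _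
      · rw [List.pairwise_map]
        exact hkeyslt
    rw [pvSorted2_fst _ hinj, pvAFold, hsorted, List.flatMap_map, List.map_flatMap]
    refine List.flatMap_congr ?_
    intro k _
    have hfd : PySem.Int.floordiv ((socks.count k : Nat) : Int) 2
        = ((socks.count k / 2 : Nat) : Int) := by
      exact_mod_cast PySem.Int.floordiv_natCast (socks.count k) 2
    simp only [hfd, Int.toNat_natCast, List.map_replicate]
  -- B's sorted pair names are exactly that flatMap (before doubling)
  have hpairs : PySem.List.sorted (socks.foldl pvStep (PySem.Set.empty, [])).2 (fun x => x)
      = keys.flatMap (fun k => List.replicate (socks.count k / 2) k) := by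
    apply PySem.List.sorted_id_eq_of_perm_of_pairwise
    · rw [List.perm_iff_count]
      intro k
      rw [pvCount_flatMap_replicate _ _ keys hkeysnd]
      have h1 := (pvToggle_spec socks PySem.Set.empty [] k).1
      have hb : k ∉ (PySem.Set.empty : PySem.Set String) := by
        simp [PySem.Set.empty]
      rw [if_neg hb, List.count_nil] at h1
      by_cases hk : k ∈ socks
      · rw [if_pos ((hkeysmem k).2 hk), h1]
        omega
      · rw [if_neg (fun h => hk ((hkeysmem k).1 h)), h1, List.count_eq_zero.2 hk]
    · exact pvFlatMap_replicate_pairwise _ keys hkeyslt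
  simp only [hpaired, hpairs]
  by_cases h : (keys.flatMap (fun k => List.replicate (socks.count k / 2) k)).isEmpty
  · have h0 : keys.flatMap (fun k => List.replicate (socks.count k / 2) k) = [] :=
      List.isEmpty_iff.1 h
    simp [h0]
  · have h0 : ¬ ((keys.flatMap (fun k => List.replicate (socks.count k / 2) k)).map
        (fun p => p ++ p)).isEmpty := by
      simp only [List.isEmpty_iff, List.map_eq_nil_iff]
      exact fun hc => h (List.isEmpty_iff.2 hc)
    rw [if_neg h0, if_neg h]
    simp
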